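-- pv_equiv track=rewrite | github.com/miliar/Code_Jam_Webscraper | solutions_python/Problem_184/866.py | is_cont
-- ===== SOURCE A (Python) =====
-- def is_cont(stringi, numbers):
-- 	is_cont = True
-- 	for letter in stringi:
-- 		if(numbers[letter] == 0):
-- 			is_cont =  False
-- 		numbers[letter] = numbers[letter] - 1
-- 	if not is_cont:
-- 		for letter in stringi:
-- 			numbers[letter] = numbers[letter] + 1
-- 	return is_cont
-- ===== SOURCE B (Python) =====
-- def is_cont(stringi, numbers):
--     counts = {}
--     for ch in stringi:
--         counts[ch] = counts.get(ch, 0) + 1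
--     if any(0 <= numbers[ch] < c for ch, c in counts.items()):
--         return False
--     for ch, c in counts.items():
--         numbers[ch] -= c
--     return True
-- ===== Notes on version B (the rewrite author's own statement) =====
-- stated objective: simpler
-- what changed: Replaces A's per-character decrement-with-flag scan plus a full restore pass by a frequency count of the string followed by one check over distinct letters (feasible iff each letter's available number is negative or at least its occurrence count), subtracting counts only on success; Pre_ excludes inputs where a character of stringi is missing from numbers (Python A raises KeyError there) and association lists with duplicate keys, which cannot arise from a Python dict argument.
import Mathlib
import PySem

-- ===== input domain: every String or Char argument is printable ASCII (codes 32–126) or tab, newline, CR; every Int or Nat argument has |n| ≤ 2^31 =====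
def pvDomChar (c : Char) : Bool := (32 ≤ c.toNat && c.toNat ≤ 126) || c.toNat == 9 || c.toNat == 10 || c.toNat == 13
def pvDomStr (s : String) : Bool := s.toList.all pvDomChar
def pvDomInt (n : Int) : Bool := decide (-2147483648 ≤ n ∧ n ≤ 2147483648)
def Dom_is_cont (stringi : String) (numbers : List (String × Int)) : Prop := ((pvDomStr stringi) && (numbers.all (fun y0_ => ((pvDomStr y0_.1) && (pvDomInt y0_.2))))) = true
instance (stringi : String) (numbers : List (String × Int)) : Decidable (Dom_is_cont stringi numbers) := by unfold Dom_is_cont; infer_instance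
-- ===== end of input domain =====

-- Both Pythons mutate `numbers` in place (A decrements then restores on failure; B subtracts
-- counts only on success — same net effect on the admitted inputs); the equivalence proved here
-- is about the RETURN value only. B replaces A's per-character decrement-then-restore scan by a
-- frequency count over distinct letters followed by one check pass (objective: simpler).


-- ===== PORT A =====
-- A's single loop: test numbers[letter] == 0 (KeyError → none), decrement, carry the flag.
def isContLoopA : List Char → PySem.Dict String Int → Bool → Option Bool
  | [], _, b => some b
  | c :: cs, d, b =>
    match d.get? (String.ofList [c]) with
    | none => none  -- Python: KeyError
    | some v => isContLoopA cs (d.insert (String.ofList [c]) (v - 1)) (if v == 0 then false else b)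

-- A's second loop only restores `numbers` (mutation, not the return value), so it is not
-- carried here; the `.getD false` only fires outside Pre_is_cont (where Python raises KeyError).
def is_cont (stringi : String) (numbers : List (String × Int)) : Bool :=
  (isContLoopA stringi.toList (PySem.Dict.mk numbers) true).getD false

-- ===== PORT B =====
-- B's `any(0 <= numbers[ch] < c for ch, c in counts.items())`: short-circuit, KeyError → none.
def altAnyBad (numbers : PySem.Dict String Int) : List (Char × Int) → Option Bool
  | [] => some false
  | (c, cnt) :: rest =>
    match numbers.get? (String.ofList [c]) with
    | none => none  -- Python: KeyError
    | some v => if 0 ≤ v ∧ v < cnt then some true else altAnyBad numbers rest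

-- B's subtraction loop only mutates `numbers` (not the return value), so it is not carried;
-- the `none → false` arm only fires outside Pre_is_cont (where Python raises KeyError).
def is_cont_alt (stringi : String) (numbers : List (String × Int)) : Bool :=
  -- counts = the frequency dict built by B's first loop
  match altAnyBad (PySem.Dict.mk numbers)
      ((stringi.toList.foldl (fun d c => d.insert c (d.getD c 0 + 1)) PySem.Dict.empty).items) with
  | none => false
  | some bad => !bad

-- ===== PRECONDITION & SPEC =====
-- Pre_ excludes (i) inputs where some character of stringi has no key in numbers — there the
-- Python A raises KeyError — and (ii) association lists with duplicate keys, which cannot arise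
-- from a Python dict argument.
def Pre_is_cont (stringi : String) (numbers : List (String × Int)) : Prop :=
  (numbers.map Prod.fst).Nodup ∧
    stringi.toList.all (fun c => (numbers.map Prod.fst).any (fun k => k.toList == [c])) = true
instance (stringi : String) (numbers : List (String × Int)) : Decidable (Pre_is_cont stringi numbers) := by unfold Pre_is_cont; infer_instance

def pvWitness_is_cont : String × (List (String × Int)) := ("abca", [("a", 2), ("b", 1), ("c", 3)])

def Spec_is_cont (stringi : String) (numbers : List (String × Int)) (out : Bool) : Prop := out = is_cont_alt stringi numbers
instance (stringi : String) (numbers : List (String × Int)) (out : Bool) : Decidable (Spec_is_cont stringi numbers out) := by unfold Spec_is_cont; infer_instance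

-- ===== CLAIM (what is proved, stated in full; the proofs are below) =====
def Claim_equal_is_cont : Prop := ∀ (stringi : String) (numbers : List (String × Int)), Dom_is_cont stringi numbers → Pre_is_cont stringi numbers → Spec_is_cont stringi numbers (is_cont stringi numbers)

-- ===== LEMMAS AND PROOFS =====

-- a character's key: String.ofList is injective on singleton lists
lemma pv_keyEq (a b : Char) : String.ofList [a] = String.ofList [b] ↔ a = b := by
  constructor
  · intro h
    have := congrArg String.toList h
    simpa using this
  · rintro rfl; rfl

-- closed form of A's loop when every looked-up key is present:
-- the flag survives iff no letter's current value ever hits 0, i.e. iff for every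
-- occurrence of a letter c its initial value lies outside [0, count c).
lemma pv_loopA_eq : ∀ (cs : List Char) (d : PySem.Dict String Int) (b : Bool),
    (∀ c ∈ cs, d.contains (String.ofList [c]) = true) →
    isContLoopA cs d b = some (b && decide (∀ c ∈ cs,
      ¬(0 ≤ d.getD (String.ofList [c]) 0 ∧ d.getD (String.ofList [c]) 0 < (cs.count c : Int))))
  | [], d, b, _ => by simp [isContLoopA]
  | c :: t, d, b, hpres => by
    have hc : d.contains (String.ofList [c]) = true := hpres c (List.mem_cons_self ..)
    obtain ⟨v, hv⟩ : ∃ v, d.get? (String.ofList [c]) = some v := by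
      rw [PySem.Dict.contains_eq_isSome_get?] at hc
      exact Option.isSome_iff_exists.mp hc
    have hgetD : d.getD (String.ofList [c]) 0 = v := by
      rw [PySem.Dict.getD_eq_get?_getD, hv]; rfl
    have hpres' : ∀ c' ∈ t,
        (d.insert (String.ofList [c]) (v - 1)).contains (String.ofList [c']) = true := by
      intro c' hc'
      rw [PySem.Dict.contains_insert]
      simp [hpres c' (List.mem_cons_of_mem _ hc')]
    simp only [isContLoopA, hv]
    rw [pv_loopA_eq t _ _ hpres']
    congr 1
    cases b with
    | false => simp
    | true =>
      have hif : (if v == 0 then false else true) = decide ¬(v = 0) := by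
        by_cases h : v = 0 <;> simp [h]
      rw [hif, Bool.true_and, ← Bool.decide_and, decide_eq_decide]
      simp only [PySem.Dict.getD_insert, pv_keyEq, List.forall_mem_cons, hgetD]
      constructor
      · rintro ⟨hv0, hall⟩
        refine ⟨?_, fun c' hc' => ?_⟩
        · by_cases hct : c ∈ t
          · have h := hall c hct
            rw [if_pos rfl] at h
            simp only [List.count_cons_self]
            push_cast
            omega
          · have h0 : t.count c = 0 := List.count_eq_zero.mpr hct
            simp only [List.count_cons_self, h0]
            push_cast
            omega
        · by_cases hcc : c' = c
          · subst hcc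
            have h := hall c' hc'
            rw [if_pos rfl] at h
            simp only [List.count_cons_self]
            push_cast
            omega
          · have h := hall c' hc'
            rw [if_neg hcc] at h
            simpa [List.count_cons, Ne.symm hcc] using h
      · rintro ⟨hqc, hall⟩
        have hcnt : ((c :: t).count c : Int) = (t.count c : Int) + 1 := by
          simp [List.count_cons_self]
        rw [List.count_cons_self] at hqc
        refine ⟨?_, fun c' hc' => ?_⟩
        · push_cast at hqc
          omega
        · by_cases hcc : c' = c
          · subst hcc
            rw [if_pos rfl]
            push_cast at hqc
            omega
          · rw [if_neg hcc]
            have h := hall c' hc'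
            simpa [List.count_cons, Ne.symm hcc] using h

-- closed form of B's `any` when every looked-up key is present
lemma pv_anyBad_eq : ∀ (nd : PySem.Dict String Int) (l : List (Char × Int)),
    (∀ p ∈ l, nd.contains (String.ofList [p.1]) = true) →
    altAnyBad nd l = some (l.any (fun p =>
      decide (0 ≤ nd.getD (String.ofList [p.1]) 0 ∧ nd.getD (String.ofList [p.1]) 0 < p.2)))
  | _, [], _ => by simp [altAnyBad]
  | nd, (c, cnt) :: rest, hpres => by
    have hc : nd.contains (String.ofList [c]) = true := hpres (c, cnt) (List.mem_cons_self ..)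
    obtain ⟨v, hv⟩ : ∃ v, nd.get? (String.ofList [c]) = some v := by
      rw [PySem.Dict.contains_eq_isSome_get?] at hc
      exact Option.isSome_iff_exists.mp hc
    have hgetD : nd.getD (String.ofList [c]) 0 = v := by
      rw [PySem.Dict.getD_eq_get?_getD, hv]; rfl
    simp only [altAnyBad, hv]
    by_cases hbad : 0 ≤ v ∧ v < cnt
    · rw [if_pos hbad]
      simp [hgetD, hbad]
    · rw [if_neg hbad]
      rw [pv_anyBad_eq nd rest (fun p hp => hpres p (List.mem_cons_of_mem _ hp))]
      simp [hgetD, hbad]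

lemma pv_final (cs : List Char) (nd : PySem.Dict String Int) :
    (true && decide (∀ c ∈ cs, ¬(0 ≤ nd.getD (String.ofList [c]) 0 ∧
        nd.getD (String.ofList [c]) 0 < (cs.count c : Int))))
    = !(((PySem.Set.ofList cs).map (fun k => (k, (cs.count k : Int)))).any (fun p =>
        decide (0 ≤ nd.getD (String.ofList [p.1]) 0 ∧ nd.getD (String.ofList [p.1]) 0 < p.2))) := by
  rw [Bool.true_and, Bool.eq_iff_iff]
  simp only [decide_eq_true_eq, Bool.not_eq_true', List.any_eq_false, List.mem_map,
    not_and, forall_exists_index, and_imp]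
  constructor
  · rintro h p k hk rfl
    simpa using h k ((PySem.Set.mem_ofList cs k).mp hk)
  · intro h c hc
    have := h (c, (cs.count c : Int)) c ((PySem.Set.mem_ofList cs c).mpr hc) rfl
    simpa using this

-- ===== VERDICT (by name: the statement is the Claim_ definition above) =====
theorem is_cont_spec : Claim_equal_is_cont := by
  intro stringi numbers _ hpre
  unfold Spec_is_cont
  have hpresA : ∀ c ∈ stringi.toList,
      (PySem.Dict.mk numbers).contains (String.ofList [c]) = true := by
    intro c hc
    have hkeys : (PySem.Dict.mk numbers).keys = numbers.map Prod.fst := rfl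
    rw [PySem.Dict.contains_iff_mem_keys, hkeys]
    obtain ⟨k, hk, hkt⟩ := List.any_eq_true.mp (List.all_eq_true.mp hpre.2 c hc)
    rw [beq_iff_eq] at hkt
    have hke : String.ofList [c] = k := by rw [← hkt]; simp
    rw [hke]
    exact hk
  have hA : is_cont stringi numbers = (true && decide (∀ c ∈ stringi.toList,
      ¬(0 ≤ (PySem.Dict.mk numbers).getD (String.ofList [c]) 0 ∧
        (PySem.Dict.mk numbers).getD (String.ofList [c]) 0 < (stringi.toList.count c : Int)))) := by
    unfold is_cont
    rw [pv_loopA_eq stringi.toList (PySem.Dict.mk numbers) true hpresA]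
    exact Option.getD_some
  have hB : is_cont_alt stringi numbers =
      !(((PySem.Set.ofList stringi.toList).map (fun k => (k, (stringi.toList.count k : Int)))).any
        (fun p => decide (0 ≤ (PySem.Dict.mk numbers).getD (String.ofList [p.1]) 0 ∧
          (PySem.Dict.mk numbers).getD (String.ofList [p.1]) 0 < p.2))) := by
    unfold is_cont_alt
    rw [PySem.Dict.foldl_insert_getD_add_one_eq_counter, PySem.Dict.items_counter]
    rw [pv_anyBad_eq (PySem.Dict.mk numbers) _ (by
      intro p hp
      rw [List.mem_map] at hp
      obtain ⟨k, hk, rfl⟩ := hp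
      exact hpresA k ((PySem.Set.mem_ofList stringi.toList k).mp hk))]
  exact hA.trans ((pv_final stringi.toList (PySem.Dict.mk numbers)).trans hB.symm)
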